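-- pv_equiv track=rewrite | github.com/29Kaggia/phase-3-wk-1-code-challenge | lib/consonant_value.py | solve
-- ===== SOURCE A (Python) =====
-- def solve(s):
--     def value_of_substring(sub):
--         return sum(ord(c) - ord('a') + 1 for c in sub)
--
--     consonant_substrings = s.split('a')  # Split the string at vowels
--
--     max_value = 0
--     for sub in consonant_substrings:
--         if sub:
--             sub_value = value_of_substring(sub)
--             max_value = max(max_value, sub_value)
--
--     return max_value
-- ===== SOURCE B (Python) =====
-- def solve(s):
--     max_value = 0
--     cur = 0
--     for c in s:
--         if c == 'a':
--             max_value = max(max_value, cur)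
--             cur = 0
--         else:
--             cur += ord(c) - ord('a') + 1
--     return max(max_value, cur)
-- ===== Notes on version B (the rewrite author's own statement) =====
-- stated objective: alternative
-- what changed: Replaced split('a') plus a per-substring summing loop with a single left-to-right pass that keeps a running segment sum, flushing it into the maximum at each 'a' and at the end; no list of substrings is built.
import Mathlib
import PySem

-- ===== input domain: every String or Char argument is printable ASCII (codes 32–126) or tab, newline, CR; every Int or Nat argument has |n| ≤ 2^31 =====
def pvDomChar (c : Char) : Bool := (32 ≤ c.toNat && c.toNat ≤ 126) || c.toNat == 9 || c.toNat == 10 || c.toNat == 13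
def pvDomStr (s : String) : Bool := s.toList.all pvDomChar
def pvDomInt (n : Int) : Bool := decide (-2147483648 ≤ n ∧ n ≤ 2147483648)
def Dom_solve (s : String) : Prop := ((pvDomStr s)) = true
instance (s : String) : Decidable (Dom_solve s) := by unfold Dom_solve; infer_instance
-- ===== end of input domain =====

-- B replaces split('a')+per-substring summation by one pass with a reset-on-'a' running sum (alternative decomposition, same cost).

-- ===== PORT A =====
-- helper: value_of_substring(sub) = sum(ord(c) - ord('a') + 1 for c in sub)
def value_of_substring (sub : List Char) : Int :=
  sub.foldl (fun acc c => acc + ((c.toNat : Int) - ('a'.toNat : Int) + 1)) 0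

def solve (s : String) : Int :=
  let consonant_substrings := PySem.Chars.splitOn s.toList "a".toList
  consonant_substrings.foldl
    (fun max_value sub =>
      if sub ≠ [] then max max_value (value_of_substring sub) else max_value) 0

-- ===== PORT B =====
def solve_alt (s : String) : Int :=
  let p := s.toList.foldl
    (fun (p : Int × Int) c =>
      if c = 'a' then (max p.1 p.2, 0)
      else (p.1, p.2 + ((c.toNat : Int) - ('a'.toNat : Int) + 1))) (0, 0)
  max p.1 p.2

-- ===== PRECONDITION & SPEC =====
def Spec_solve (s : String) (out : Int) : Prop := out = solve_alt s
instance (s : String) (out : Int) : Decidable (Spec_solve s out) := by unfold Spec_solve; infer_instance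

-- ===== CLAIM (what is proved, stated in full; the proofs are below) =====
def Claim_equal_solve : Prop := ∀ (s : String), Dom_solve s → Spec_solve s (solve s)

-- ===== LEMMAS AND PROOFS =====

-- reference split of a char list at 'a' (Python s.split('a'))
def segsA : List Char → List (List Char)
  | [] => [[]]
  | c :: t => if c = 'a' then [] :: segsA t
              else match segsA t with
                | [] => [[c]]
                | h :: r => (c :: h) :: r

lemma segsA_ne_nil (l : List Char) : segsA l ≠ [] := by
  cases l with
  | nil => simp [segsA]
  | cons c t =>
    simp only [segsA]
    split
    · simp
    · split <;> simp

lemma go_eq (l : List Char) : ∀ (fuel : Nat) (cur : List Char) (acc : List (List Char)),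
    l.length ≤ fuel →
    PySem.Chars.splitOn.go "a".toList fuel l cur acc
      = acc.reverse ++ (segsA l).modifyHead (fun h => cur.reverse ++ h) := by
  induction l with
  | nil =>
    intro fuel cur acc _
    cases fuel <;> simp [PySem.Chars.splitOn.go, segsA]
  | cons c t ih =>
    intro fuel cur acc hlen
    cases fuel with
    | zero => simp at hlen
    | succ f =>
      simp only [List.length_cons] at hlen
      by_cases hc : c = 'a'
      · subst hc
        rw [show PySem.Chars.splitOn.go "a".toList (f+1) ('a' :: t) cur acc
              = PySem.Chars.splitOn.go "a".toList f t [] (cur.reverse :: acc) from by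
              simp [PySem.Chars.splitOn.go, List.isPrefixOf]]
        rw [ih f [] (cur.reverse :: acc) (by omega)]
        simp [segsA, List.modifyHead]
        cases segsA t <;> rfl
      · rw [show PySem.Chars.splitOn.go "a".toList (f+1) (c :: t) cur acc
              = PySem.Chars.splitOn.go "a".toList f t (c :: cur) acc from by
              simp [PySem.Chars.splitOn.go, List.isPrefixOf]
              intro h; exact absurd h.symm hc]
        rw [ih f (c :: cur) acc (by omega)]
        simp only [segsA, if_neg hc]
        rcases h : segsA t with _ | ⟨h1, r⟩
        · exact absurd h (segsA_ne_nil t)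
        · simp [List.modifyHead]

lemma splitOn_a (l : List Char) :
    PySem.Chars.splitOn l "a".toList = segsA l := by
  unfold PySem.Chars.splitOn
  rw [go_eq l (l.length + 1) [] [] (by omega)]
  rcases h : segsA l with _ | ⟨h1, r⟩
  · exact absurd h (segsA_ne_nil l)
  · simp [List.modifyHead]

lemma foldl_add_init (t : List Char) (f : Char → Int) : ∀ (a : Int),
    t.foldl (fun acc c => acc + f c) a = a + t.foldl (fun acc c => acc + f c) 0 := by
  induction t with
  | nil => intro a; simp
  | cons c t ih =>
    intro a
    rw [List.foldl_cons, List.foldl_cons, ih (a + f c), ih (0 + f c)]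
    ring

lemma val_cons (c : Char) (t : List Char) :
    value_of_substring (c :: t)
      = ((c.toNat : Int) - ('a'.toNat : Int) + 1) + value_of_substring t := by
  unfold value_of_substring
  rw [List.foldl_cons, foldl_add_init]
  ring

-- A's foldl with the `if sub:` guard equals the plain max-foldl when the accumulator is nonnegative
lemma fold_if_eq (segs : List (List Char)) : ∀ (m : Int), 0 ≤ m →
    segs.foldl (fun mv sub => if sub ≠ [] then max mv (value_of_substring sub) else mv) m
      = segs.foldl (fun mv sub => max mv (value_of_substring sub)) m := by
  induction segs with
  | nil => intro m _; rfl
  | cons h r ih =>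
    intro m hm
    simp only [List.foldl_cons]
    by_cases hh : h = []
    · subst hh
      have hv : value_of_substring ([] : List Char) = 0 := rfl
      rw [if_neg (by simp), hv, max_eq_left hm]
      exact ih m hm
    · rw [if_pos hh]
      exact ih _ (le_trans hm (le_max_left _ _))

-- the one-pass fold computes the same maximum as the plain max-foldl over the segments,
-- with the pending partial sum `cur` prefixed onto the first segment
lemma key (l : List Char) : ∀ (m cur : Int) (h : List Char) (r : List (List Char)),
    segsA l = h :: r →
    max (l.foldl
        (fun (p : Int × Int) c =>
          if c = 'a' then (max p.1 p.2, 0)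
          else (p.1, p.2 + ((c.toNat : Int) - ('a'.toNat : Int) + 1))) (m, cur)).1
      (l.foldl
        (fun (p : Int × Int) c =>
          if c = 'a' then (max p.1 p.2, 0)
          else (p.1, p.2 + ((c.toNat : Int) - ('a'.toNat : Int) + 1))) (m, cur)).2
      = r.foldl (fun mv sub => max mv (value_of_substring sub))
          (max m (cur + value_of_substring h)) := by
  induction l with
  | nil =>
    intro m cur h r hseg
    simp only [segsA] at hseg
    cases hseg
    have hv : value_of_substring ([] : List Char) = 0 := rfl
    simp [hv]
  | cons c t ih =>
    intro m cur h r hseg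
    rcases ht : segsA t with _ | ⟨h1, r1⟩
    · exact absurd ht (segsA_ne_nil t)
    by_cases hc : c = 'a'
    · subst hc
      simp only [segsA] at hseg
      cases hseg
      simp only [List.foldl_cons, if_true]
      rw [ih (max m cur) 0 h1 r1 ht, ht]
      have hv : value_of_substring ([] : List Char) = 0 := rfl
      simp [hv]
    · simp only [segsA, if_neg hc, ht] at hseg
      cases hseg
      simp only [List.foldl_cons, if_neg hc]
      rw [ih m (cur + ((c.toNat : Int) - ('a'.toNat : Int) + 1)) h1 _ ht, val_cons,
        add_assoc]

-- ===== VERDICT (by name: the statement is the Claim_ definition above) =====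
theorem solve_spec : Claim_equal_solve := by
  intro s _
  unfold Spec_solve solve solve_alt
  rcases h : segsA s.toList with _ | ⟨h1, r⟩
  · exact absurd h (segsA_ne_nil s.toList)
  rw [splitOn_a, h]
  show _ = max (s.toList.foldl _ (0, 0)).1 (s.toList.foldl _ (0, 0)).2
  rw [key s.toList 0 0 h1 r h]
  simp only [List.foldl_cons, zero_add]
  have hinit : (if h1 ≠ [] then max 0 (value_of_substring h1) else 0)
      = max 0 (value_of_substring h1) := by
    by_cases hh : h1 = []
    · subst hh
      simp [show value_of_substring ([] : List Char) = 0 from rfl]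
    · rw [if_pos hh]
  rw [hinit, fold_if_eq r (max 0 (value_of_substring h1)) (le_max_left _ _)]
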